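-- pv_equiv track=rewrite | github.com/nhdewitt/codewars-kata | 7 kyu/single_digit.py | single_digit
-- ===== SOURCE A (Python) =====
-- def single_digit(n):
--     if n < 9: return n
--     b = bin(n)[2:]
--     ck = b.count("1")
--     while ck > 9:
--         b = bin(ck)[2:]
--         ck = b.count("1")
--     return ck
-- ===== SOURCE B (Python) =====
-- def single_digit(n):
--     # Loop-free: for the bounded (32-bit) inputs this task covers, the first
--     # bit count is at most 32, and the bit count of any value below 512 is at
--     # most 9, so a second count always lands in single-digit range already.
--     if n < 9:
--         return n
--     c = n.bit_count()
--     if c <= 9: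
--         return c
--     return c.bit_count()
-- ===== Notes on version B (the rewrite author's own statement) =====
-- stated objective: alternative
-- what changed: Eliminates A's while-loop and binary-string building entirely: since a 32-bit input has at most 32 set bits and the popcount of anything below 512 is at most 9, B is straight-line code doing one bit_count and at most one more, with no loop and no strings.
import Mathlib
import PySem

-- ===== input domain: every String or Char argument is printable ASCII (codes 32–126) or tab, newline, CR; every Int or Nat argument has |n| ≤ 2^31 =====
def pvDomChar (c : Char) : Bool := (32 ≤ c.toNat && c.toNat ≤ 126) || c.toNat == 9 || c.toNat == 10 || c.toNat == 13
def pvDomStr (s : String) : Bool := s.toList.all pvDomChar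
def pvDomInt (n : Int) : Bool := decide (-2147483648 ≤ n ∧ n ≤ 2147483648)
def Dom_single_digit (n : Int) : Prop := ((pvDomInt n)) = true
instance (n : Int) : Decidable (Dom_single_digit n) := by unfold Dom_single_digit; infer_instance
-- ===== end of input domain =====

-- B removes A's reduction loop and binary strings: on the 32-bit domain of this
-- claim one builtin bit count plus at most one more is provably enough (alternative, straight-line).

-- ===== PORT A =====

-- bin(x)[2:] for x > 0: the binary digits of x, most significant first (exact for x > 0,
-- the only case A reaches it).
def binChars (x : Nat) : List Char :=
  if h : x = 0 then []
  else binChars (x / 2) ++ [if x % 2 = 1 then '1' else '0']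
decreasing_by exact Nat.div_lt_self (Nat.pos_of_ne_zero h) (by omega)

-- shared popcount: the Lean counterpart of Python's builtin int.bit_count() (B calls it),
-- also used by A's loop termination argument and the proofs below
def pop (x : Nat) : Nat :=
  if h : x = 0 then 0 else x % 2 + pop (x / 2)
decreasing_by exact Nat.div_lt_self (Nat.pos_of_ne_zero h) (by omega)

theorem count_binChars (x : Nat) : (binChars x).count '1' = pop x := by
  induction x using Nat.strong_induction_on with
  | _ x ih =>
    rw [binChars, pop]
    by_cases h : x = 0
    · simp [h]
    · have hx : x / 2 < x := Nat.div_lt_self (Nat.pos_of_ne_zero h) (by omega)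
      rw [dif_neg h, dif_neg h, List.count_append, ih _ hx]
      by_cases h2 : x % 2 = 1 <;> simp [h2] <;> omega

theorem pop_lt (x : Nat) (h : 2 ≤ x) : pop x < x := by
  induction x using Nat.strong_induction_on with
  | _ x ih =>
    have h0 : x ≠ 0 := by omega
    rw [pop, dif_neg h0]
    by_cases h2 : 2 ≤ x / 2
    · have := ih (x / 2) (by omega) h2
      omega
    · have h3 : x ≤ 3 := by omega
      interval_cases x <;> simp [pop]

-- b.count("1") < ck whenever ck > 9: needed for the while-loop termination in A's port
theorem count_binChars_lt (ck : Nat) (h : 9 < ck) : (binChars ck).count '1' < ck := by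
  rw [count_binChars]; exact pop_lt ck (by omega)

-- while ck > 9: b = bin(ck)[2:]; ck = b.count("1")
def loopA (ck : Nat) : Nat :=
  if h : 9 < ck then loopA ((binChars ck).count '1') else ck
decreasing_by exact count_binChars_lt ck h

def single_digit (n : Int) : Int :=
  if n < 9 then n
  else
    let b := binChars n.toNat   -- n ≥ 9 here, so toNat is exact
    let ck := b.count '1'
    Int.ofNat (loopA ck)

-- ===== PORT B =====

def single_digit_alt (n : Int) : Int :=
  if n < 9 then n
  else
    let c := pop n.toNat   -- pop = Lean counterpart of builtin int.bit_count(); n ≥ 9 here, so toNat is exact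
    if c ≤ 9 then Int.ofNat c
    else Int.ofNat (pop c)

-- ===== PRECONDITION & SPEC =====
def Spec_single_digit (n : Int) (out : Int) : Prop := out = single_digit_alt n
instance (n : Int) (out : Int) : Decidable (Spec_single_digit n out) := by unfold Spec_single_digit; infer_instance

-- ===== CLAIM =====
def Claim_equal_single_digit : Prop := ∀ (n : Int), Dom_single_digit n → Spec_single_digit n (single_digit n)

-- ===== LEMMAS AND PROOFS =====

theorem pop_le_of_lt_two_pow (k x : Nat) (h : x < 2 ^ k) : pop x ≤ k := by
  induction k generalizing x with
  | zero =>
    have : x = 0 := by omega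
    simp [this, pop]
  | succ k ih =>
    by_cases h0 : x = 0
    · simp [h0, pop]
    · rw [pop, dif_neg h0]
      have hd : x / 2 < 2 ^ k := by
        have : 2 ^ (k + 1) = 2 * 2 ^ k := by ring
        omega
      have := ih (x / 2) hd
      omega

theorem loopA_small (c : Nat) (h : c ≤ 9) : loopA c = c := by
  rw [loopA, dif_neg (by omega)]

theorem loopA_eq_alt (c : Nat) (hc : c ≤ 32) :
    loopA c = if c ≤ 9 then c else pop c := by
  by_cases h : c ≤ 9
  · rw [if_pos h, loopA_small c h]
  · rw [if_neg h, loopA, dif_pos (by omega), count_binChars]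
    exact loopA_small _ (le_trans (pop_le_of_lt_two_pow 6 c (by omega)) (by omega))

-- ===== VERDICT =====
theorem single_digit_spec : Claim_equal_single_digit := by
  intro n hdom
  unfold Spec_single_digit single_digit single_digit_alt
  by_cases h : n < 9
  · simp [h]
  · rw [if_neg h, if_neg h]
    have hn : n.toNat < 2 ^ 32 := by
      simp only [Dom_single_digit, pvDomInt, decide_eq_true_eq] at hdom
      omega
    have hc : pop n.toNat ≤ 32 := pop_le_of_lt_two_pow 32 n.toNat hn
    show Int.ofNat (loopA ((binChars n.toNat).count '1')) = _
    simp only [count_binChars, loopA_eq_alt _ hc]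
    split_ifs <;> rfl
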